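-- pv_equiv track=rewrite | github.com/tyouritsugun/curated-heuristic-loop | src/services/gpu_installer.py | parse_gpu_priority
-- ===== SOURCE A (Python) =====
-- from typing import Dict, List, Optional, Tuple
--
-- SUPPORTED_GPU_BACKENDS = ("metal", "cuda", "rocm", "cpu")
--
-- DEFAULT_GPU_PRIORITY = ("metal", "cuda", "rocm", "cpu")
--
-- def parse_gpu_priority(value: Optional[str]) -> List[str]:
--     if not value:
--         ordered = list(DEFAULT_GPU_PRIORITY)
--     else:
--         tokens = [token.strip().lower() for token in value.split(",") if token.strip()]
--         ordered = []
--         for token in tokens: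
--             if token in SUPPORTED_GPU_BACKENDS and token not in ordered:
--                 ordered.append(token)
--         for backend in DEFAULT_GPU_PRIORITY:
--             if backend not in ordered:
--                 ordered.append(backend)
--     return ordered
-- ===== SOURCE B (Python) =====
-- SUPPORTED_GPU_BACKENDS = ("metal", "cuda", "rocm", "cpu")
--
-- DEFAULT_GPU_PRIORITY = ("metal", "cuda", "rocm", "cpu")
--
-- def parse_gpu_priority(value):
--     tokens = [t.strip().lower() for t in value.split(",") if t.strip()] if value else []
--     present = sorted((b for b in SUPPORTED_GPU_BACKENDS if b in tokens), key=tokens.index)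
--     return present + [b for b in SUPPORTED_GPU_BACKENDS if b not in tokens]
-- ===== Notes on version B (the rewrite author's own statement) =====
-- stated objective: simpler
-- what changed: Replaces A's two sequential append-loops with membership dedup by a single stable sort of the backend tuple keyed by each backend's first-occurrence index among the parsed tokens (absent backends filtered to the tail in default order).
import Mathlib
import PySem

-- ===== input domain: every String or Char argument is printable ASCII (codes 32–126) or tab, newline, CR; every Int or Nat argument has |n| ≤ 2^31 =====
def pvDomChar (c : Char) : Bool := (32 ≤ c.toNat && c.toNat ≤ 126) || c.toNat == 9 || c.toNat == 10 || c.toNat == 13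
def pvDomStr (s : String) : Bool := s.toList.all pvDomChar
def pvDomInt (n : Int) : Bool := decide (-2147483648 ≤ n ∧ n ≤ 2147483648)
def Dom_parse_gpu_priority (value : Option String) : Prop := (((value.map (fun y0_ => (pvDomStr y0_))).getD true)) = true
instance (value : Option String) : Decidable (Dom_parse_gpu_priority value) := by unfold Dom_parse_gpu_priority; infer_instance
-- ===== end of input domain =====

-- B replaces A's two append-loops with membership tests by one stable sort of the
-- backend tuple keyed by each backend's first-occurrence index among the tokens
-- (objective: simpler decomposition; not claimed faster).

-- shared tokenization: [token.strip().lower() for token in value.split(",") if token.strip()]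
def pvTokens (s : String) : List String :=
  (((PySem.Str.split? s ",").getD []).filter (fun t => PySem.Str.strip t ≠ "")).map
    (fun t => PySem.Str.lower (PySem.Str.strip t))

def pvSupported : List String := ["metal", "cuda", "rocm", "cpu"]
def pvDefault : List String := ["metal", "cuda", "rocm", "cpu"]

-- ===== PORT A =====
def parse_gpu_priority (value : Option String) : List String :=
  match value with
  | none => pvDefault
  | some s =>
    if s = "" then pvDefault
    else
      let tokens := pvTokens s
      let ordered := tokens.foldl
        (fun acc t => if pvSupported.contains t && !acc.contains t then acc ++ [t] else acc) []
      pvDefault.foldl (fun acc b => if !acc.contains b then acc ++ [b] else acc) ordered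

-- ===== PORT B =====
-- key=tokens.index is only applied to backends present in tokens, so index? is
-- always `some` there; `.getD 0` is exact on that domain.
def parse_gpu_priority_alt (value : Option String) : List String :=
  let tokens := match value with
    | none => []
    | some s => if s = "" then [] else pvTokens s
  let present := PySem.List.sorted (pvSupported.filter (fun b => tokens.contains b))
    (fun b => (PySem.List.index? tokens b).getD 0) false
  present ++ pvSupported.filter (fun b => !(tokens.contains b))

-- ===== PRECONDITION & SPEC =====
def Spec_parse_gpu_priority (value : Option String) (out : List String) : Prop := out = parse_gpu_priority_alt value
instance (value : Option String) (out : List String) : Decidable (Spec_parse_gpu_priority value out) := by unfold Spec_parse_gpu_priority; infer_instance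

-- ===== CLAIM (what is proved, stated in full; the proofs are below) =====
def Claim_equal_parse_gpu_priority : Prop := ∀ (value : Option String), Dom_parse_gpu_priority value → Spec_parse_gpu_priority value (parse_gpu_priority value)

-- ===== LEMMAS AND PROOFS =====

-- the distinct supported tokens appended by A's first loop, in order
def pvDnew : List String → List String → List String
  | [], _ => []
  | t :: ts, seen =>
      if pvSupported.contains t && !seen.contains t then t :: pvDnew ts (seen ++ [t])
      else pvDnew ts seen

lemma pvFoldl_eq_dnew : ∀ (ts acc : List String),
    ts.foldl (fun acc t => if pvSupported.contains t && !acc.contains t then acc ++ [t] else acc) acc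
      = acc ++ pvDnew ts acc := by
  intro ts
  induction ts with
  | nil => intro acc; simp [pvDnew]
  | cons t ts ih =>
    intro acc
    by_cases h : (pvSupported.contains t && !acc.contains t) = true
    · rw [List.foldl_cons, if_pos h, ih, pvDnew, if_pos h]
      simp
    · rw [List.foldl_cons, if_neg h, ih, pvDnew, if_neg h]

lemma pvMem_dnew : ∀ (ts seen : List String) (b : String),
    b ∈ pvDnew ts seen ↔ b ∈ pvSupported ∧ b ∈ ts ∧ b ∉ seen := by
  intro ts
  induction ts with
  | nil => intro seen b; simp [pvDnew]
  | cons t ts ih =>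
    intro seen b
    by_cases h : (pvSupported.contains t && !seen.contains t) = true
    · rw [pvDnew, if_pos h]
      simp only [List.mem_cons, ih, List.mem_append]
      simp only [Bool.and_eq_true, Bool.not_eq_true', List.contains_eq_mem,
        decide_eq_true_eq, decide_eq_false_iff_not] at h
      by_cases hbt : b = t
      · subst hbt; tauto
      · tauto
    · rw [pvDnew, if_neg h]
      simp only [ih, List.mem_cons]
      simp only [Bool.and_eq_true, Bool.not_eq_true', List.contains_eq_mem,
        decide_eq_true_eq, decide_eq_false_iff_not, not_and, not_not] at h
      constructor
      · tauto
      · rintro ⟨hs, hmem, hseen⟩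
        refine ⟨hs, ?_, hseen⟩
        rcases hmem with rfl | hmem
        · exact absurd (h hs) hseen
        · exact hmem

lemma pvPairwise_dnew : ∀ (ts seen : List String),
    (pvDnew ts seen).Pairwise
      (fun a b => (PySem.List.index? ts a).getD 0 < (PySem.List.index? ts b).getD 0) := by
  intro ts
  induction ts with
  | nil => intro seen; simp [pvDnew]
  | cons t ts ih =>
    intro seen
    have hkey : ∀ b, b ≠ t → b ∈ ts →
        (PySem.List.index? (t :: ts) b).getD 0 = (PySem.List.index? ts b).getD 0 + 1 := by
      intro b hne hmem
      rw [PySem.List.index?_cons_of_ne ts (Ne.symm hne)]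
      rcases (PySem.List.index?_isSome_iff ts b).mpr hmem with h
      rcases Option.isSome_iff_exists.mp h with ⟨k, hk⟩
      rw [hk]
      simp
    by_cases h : (pvSupported.contains t && !seen.contains t) = true
    · rw [pvDnew, if_pos h]
      constructor
      · intro b hb
        rcases (pvMem_dnew ts (seen ++ [t]) b).mp hb with ⟨_, hbts, hbseen⟩
        have hne : b ≠ t := by
          intro e; exact hbseen (by simp [e])
        rw [hkey b hne hbts, PySem.List.index?_cons_self]
        simp
      · refine List.Pairwise.imp_of_mem ?_ (ih (seen ++ [t]))
        intro a b ha hb hlt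
        rcases (pvMem_dnew ts (seen ++ [t]) a).mp ha with ⟨_, hats, haseen⟩
        rcases (pvMem_dnew ts (seen ++ [t]) b).mp hb with ⟨_, hbts, hbseen⟩
        have hna : a ≠ t := fun e => haseen (by simp [e])
        have hnb : b ≠ t := fun e => hbseen (by simp [e])
        rw [hkey a hna hats, hkey b hnb hbts]
        omega
    · rw [pvDnew, if_neg h]
      refine List.Pairwise.imp_of_mem ?_ (ih seen)
      intro a b ha hb hlt
      rcases (pvMem_dnew ts seen a).mp ha with ⟨has, hats, haseen⟩
      rcases (pvMem_dnew ts seen b).mp hb with ⟨hbs, hbts, hbseen⟩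
      simp only [Bool.and_eq_true, Bool.not_eq_true', List.contains_eq_mem,
        decide_eq_true_eq, decide_eq_false_iff_not, not_and, not_not] at h
      have hna : a ≠ t := by intro e; subst e; exact haseen (h has)
      have hnb : b ≠ t := by intro e; subst e; exact hbseen (h hbs)
      rw [hkey a hna hats, hkey b hnb hbts]
      omega

lemma pvNodup_dnew (ts seen : List String) : (pvDnew ts seen).Nodup := by
  refine List.Pairwise.imp ?_ (pvPairwise_dnew ts seen)
  intro a b hlt e
  subst e
  exact lt_irrefl _ hlt

lemma pvSorted_eq_dnew (tokens : List String) :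
    PySem.List.sorted (pvSupported.filter (fun b => tokens.contains b))
        (fun b => (PySem.List.index? tokens b).getD 0) false
      = pvDnew tokens [] := by
  apply PySem.List.sorted_eq_of_perm_of_pairwise_lt
  · rw [List.perm_ext_iff_of_nodup (pvNodup_dnew tokens [])
      (List.Nodup.filter _ (by decide))]
    intro b
    rw [pvMem_dnew]
    simp [List.mem_filter]
  · exact pvPairwise_dnew tokens []

lemma pvSecond_loop (tokens d : List String)
    (hd : ∀ b, b ∈ d ↔ b ∈ pvSupported ∧ b ∈ tokens) :
    pvDefault.foldl (fun acc b => if !acc.contains b then acc ++ [b] else acc) d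
      = d ++ pvSupported.filter (fun b => !(tokens.contains b)) := by
  have hm : ("metal" ∈ d) = ("metal" ∈ tokens) := by
    simp [hd "metal", pvSupported]
  have hc : ("cuda" ∈ d) = ("cuda" ∈ tokens) := by
    simp [hd "cuda", pvSupported]
  have hr : ("rocm" ∈ d) = ("rocm" ∈ tokens) := by
    simp [hd "rocm", pvSupported]
  have hp : ("cpu" ∈ d) = ("cpu" ∈ tokens) := by
    simp [hd "cpu", pvSupported]
  simp only [pvDefault, pvSupported, List.foldl, List.filter]
  by_cases h1 : "metal" ∈ tokens <;> by_cases h2 : "cuda" ∈ tokens <;>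
    by_cases h3 : "rocm" ∈ tokens <;> by_cases h4 : "cpu" ∈ tokens <;>
    simp [h1, h2, h3, h4, hm, hc, hr, hp, List.contains_eq_mem]

lemma pvMain (tokens : List String) :
    pvDefault.foldl (fun acc b => if !acc.contains b then acc ++ [b] else acc)
        (tokens.foldl
          (fun acc t => if pvSupported.contains t && !acc.contains t then acc ++ [t] else acc) [])
      = PySem.List.sorted (pvSupported.filter (fun b => tokens.contains b))
          (fun b => (PySem.List.index? tokens b).getD 0) false
        ++ pvSupported.filter (fun b => !(tokens.contains b)) := by
  rw [pvFoldl_eq_dnew, List.nil_append, pvSorted_eq_dnew]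
  apply pvSecond_loop
  intro b
  rw [pvMem_dnew]
  tauto

-- ===== VERDICT (by name: the statement is the Claim_ definition above) =====
theorem parse_gpu_priority_spec : Claim_equal_parse_gpu_priority := by
  intro value _
  unfold Spec_parse_gpu_priority parse_gpu_priority parse_gpu_priority_alt
  match value with
  | none => decide
  | some s =>
    by_cases hs : s = ""
    · simp only [hs, if_true]
      decide
    · simp only [hs, if_false]
      exact pvMain (pvTokens s)
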